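-- pv_equiv track=rewrite | github.com/totoLab/code-ingegneria-informatica | fondamenti1/simulazioni_esame/08022022/es3.py | genera_filiali_ritardo
-- ===== SOURCE A (Python) =====
-- def calcola_ritardo(M, ordine):
--     return M[ordine][1] - M[ordine][3]
--
-- def genera_filiali_ritardo(M):
--     filiali_ritardo = {}
--     for ordine in range(len(M)):
--         filiale = M[ordine][0]
--         if filiale not in filiali_ritardo:
--             filiali_ritardo[filiale] = 0
--         filiali_ritardo[filiale] += calcola_ritardo(M, ordine)
--
--     return filiali_ritardo
--
-- M = [
--     ["Filiale A", 10, 5, 8],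
--     ["Filiale B", 12, 10, 12],
--     ["Filiale C", 6, 5, 4],
--     ["Filiale D", 4, 5, 4],
--     ["Filiale E", 8, 10, 7],
--     ["Filiale F", 6, 15, 5],
--     ["Filiale A", 10, 10, 9],
--     ["Filiale B", 11, 5, 11],
--     ["Filiale C", 6, 5, 5],
--     ["Filiale D", 11, 10, 10],
-- ]
-- ===== SOURCE B (Python) =====
-- def genera_filiali_ritardo(M):
--     # Alternative decomposition: collect the distinct branch names first (in
--     # first-occurrence order), then compute each branch's total delay with a
--     # dedicated pass, instead of accumulating a running dict row by row.
--     branches = list(dict.fromkeys(row[0] for row in M))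
--     return {f: sum(row[1] - row[3] for row in M if row[0] == f) for f in branches}
-- ===== Notes on version B (the rewrite author's own statement) =====
-- stated objective: alternative
-- what changed: Replaces the single-pass running-dict accumulation over row indices with a grouped aggregation: first dedup the branch names in first-occurrence order, then one filtered summing pass per branch.
import Mathlib
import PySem

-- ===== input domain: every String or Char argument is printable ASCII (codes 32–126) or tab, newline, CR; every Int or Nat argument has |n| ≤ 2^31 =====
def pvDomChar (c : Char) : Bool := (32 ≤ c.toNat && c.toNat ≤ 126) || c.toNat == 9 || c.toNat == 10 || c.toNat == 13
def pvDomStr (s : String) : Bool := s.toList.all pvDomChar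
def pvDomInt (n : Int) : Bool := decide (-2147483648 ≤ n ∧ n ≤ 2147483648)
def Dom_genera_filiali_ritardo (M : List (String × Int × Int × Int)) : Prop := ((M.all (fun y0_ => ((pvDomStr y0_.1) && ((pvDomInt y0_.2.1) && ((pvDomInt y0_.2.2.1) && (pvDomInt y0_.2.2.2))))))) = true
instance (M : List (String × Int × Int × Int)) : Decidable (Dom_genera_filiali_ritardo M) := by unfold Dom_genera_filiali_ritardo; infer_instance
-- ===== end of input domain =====

-- B replaces A's single running-dict pass by dedup-the-branches then one filtered sum per branch (alternative decomposition, same results).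


-- ===== PORT A =====
def calcola_ritardo (M : List (String × Int × Int × Int)) (ordine : Int) : Int :=
  (PySem.List.pyGetD M ordine ("", 0, 0, 0)).2.1 - (PySem.List.pyGetD M ordine ("", 0, 0, 0)).2.2.2

def genera_filiali_ritardo (M : List (String × Int × Int × Int)) : List (String × Int) :=
  ((PySem.List.pyRange 0 (M.length : Int) 1).foldl
    (fun filiali_ritardo ordine =>
      let filiale := (PySem.List.pyGetD M ordine ("", 0, 0, 0)).1
      let d1 := if filiali_ritardo.contains filiale then filiali_ritardo
                else filiali_ritardo.insert filiale 0
      d1.insert filiale (d1.getD filiale 0 + calcola_ritardo M ordine))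
    PySem.Dict.empty).items

-- ===== PORT B =====
def genera_filiali_ritardo_alt (M : List (String × Int × Int × Int)) : List (String × Int) :=
  (PySem.List.dedup (M.map (fun row => row.1))).map
    (fun f => (f, ((M.filter (fun row => row.1 == f)).map (fun row => row.2.1 - row.2.2.2)).sum))

-- ===== PRECONDITION & SPEC =====
def Spec_genera_filiali_ritardo (M : List (String × Int × Int × Int)) (out : List (String × Int)) : Prop := out = genera_filiali_ritardo_alt M
instance (M : List (String × Int × Int × Int)) (out : List (String × Int)) : Decidable (Spec_genera_filiali_ritardo M out) := by unfold Spec_genera_filiali_ritardo; infer_instance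

-- ===== CLAIM (what is proved, stated in full; the proofs are below) =====
def Claim_equal_genera_filiali_ritardo : Prop := ∀ (M : List (String × Int × Int × Int)), Dom_genera_filiali_ritardo M → Spec_genera_filiali_ritardo M (genera_filiali_ritardo M)

-- ===== LEMMAS AND PROOFS =====

-- A's per-row step (conditional 0-insert, then add) is a single insert of the incremented value.
theorem stepA_eq (d : PySem.Dict String Int) (r : String × Int × Int × Int) :
    (let filiale := r.1
     let d1 := if d.contains filiale then d else d.insert filiale 0
     d1.insert filiale (d1.getD filiale 0 + (r.2.1 - r.2.2.2)))
    = d.insert r.1 (d.getD r.1 0 + (r.2.1 - r.2.2.2)) := by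
  by_cases h : d.contains r.1
  · simp [h]
  · have h' : d.contains r.1 = false := by simpa using h
    simp [h', PySem.Dict.getD_insert_self, PySem.Dict.insert_insert_self,
          PySem.Dict.getD_of_not_contains]

-- value of the insert-accumulate fold at any key
theorem fold_getD (l : List (String × Int × Int × Int)) (d : PySem.Dict String Int) (k : String) :
    (l.foldl (fun d r => d.insert r.1 (d.getD r.1 0 + (r.2.1 - r.2.2.2))) d).getD k 0
    = d.getD k 0 + ((l.filter (fun row => row.1 == k)).map (fun row => row.2.1 - row.2.2.2)).sum := by
  induction l generalizing d with
  | nil => simp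
  | cons r rest ih =>
    simp only [List.foldl_cons, ih, List.filter_cons]
    by_cases h : r.1 = k
    · simp [h, PySem.Dict.getD_insert_self]
      ring
    · simp [h, PySem.Dict.getD_insert, Ne.symm h]

-- A's index loop is the insert-accumulate fold over the rows.
theorem A_eq_fold (M : List (String × Int × Int × Int)) :
    genera_filiali_ritardo M
    = (M.foldl (fun d r => d.insert r.1 (d.getD r.1 0 + (r.2.1 - r.2.2.2))) PySem.Dict.empty).items := by
  unfold genera_filiali_ritardo calcola_ritardo
  rw [show (fun (filiali_ritardo : PySem.Dict String Int) (ordine : Int) =>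
        let filiale := (PySem.List.pyGetD M ordine ("", 0, 0, 0)).1
        let d1 := if filiali_ritardo.contains filiale then filiali_ritardo
                  else filiali_ritardo.insert filiale 0
        d1.insert filiale (d1.getD filiale 0 +
          ((PySem.List.pyGetD M ordine ("", 0, 0, 0)).2.1 -
           (PySem.List.pyGetD M ordine ("", 0, 0, 0)).2.2.2)))
      = (fun (d : PySem.Dict String Int) (j : Int) =>
          (fun (d : PySem.Dict String Int) (r : String × Int × Int × Int) =>
            d.insert r.1 (d.getD r.1 0 + (r.2.1 - r.2.2.2))) d (PySem.List.pyGetD M j ("", 0, 0, 0)))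
      from funext fun d => funext fun j => stepA_eq d _]
  exact congrArg PySem.Dict.items
    (PySem.List.foldl_pyRange_zero_pyGetD' M ("", 0, 0, 0)
      (fun (d : PySem.Dict String Int) (r : String × Int × Int × Int) =>
        d.insert r.1 (d.getD r.1 0 + (r.2.1 - r.2.2.2))) PySem.Dict.empty)

-- ===== VERDICT (by name: the statement is the Claim_ definition above) =====
theorem genera_filiali_ritardo_spec : Claim_equal_genera_filiali_ritardo := by
  intro M _
  show genera_filiali_ritardo M = genera_filiali_ritardo_alt M
  have hnd : ((M.foldl (fun d r => d.insert r.1 (d.getD r.1 0 + (r.2.1 - r.2.2.2)))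
      PySem.Dict.empty).keys).Nodup :=
    PySem.Dict.nodup_keys_foldl_insert_key M (fun r => r.1) _ PySem.Dict.empty
      (by rw [PySem.Dict.keys_empty]; exact List.nodup_nil)
  rw [A_eq_fold, PySem.Dict.items_eq_map_keys _ hnd 0,
      PySem.Dict.keys_foldl_insert_key, PySem.Dict.keys_empty, PySem.Set.update_nil_left]
  unfold genera_filiali_ritardo_alt
  rw [PySem.List.dedup_eq_ofList]
  refine List.map_congr_left ?_
  intro k _
  rw [fold_getD, PySem.Dict.getD_empty, zero_add]
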